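-- pv_equiv track=rewrite | github.com/roypel/cs-projects | Python/Extended Introduction to CS/hw5.py | suffix_prefix_overlap
-- ===== SOURCE A (Python) =====
-- def suffix_prefix_overlap(lst, k):
--     ans = []
--     suff = ""
--     for i in range(len(lst)):
--         suff = lst[i][-k:]
--         for j in range(len(lst)):
--             if i != j:
--                 if lst[j][:k] == suff:
--                     ans.append((i,j))
--     return ans
-- ===== SOURCE B (Python) =====
-- def suffix_prefix_overlap(lst, k):
--     buckets = {}
--     for j, s in enumerate(lst):
--         buckets.setdefault(s[:k], []).append(j)
--     ans = []
--     for i, s in enumerate(lst):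
--         for j in buckets.get(s[-k:], []):
--             if j != i:
--                 ans.append((i, j))
--     return ans
-- ===== Notes on version B (the rewrite author's own statement) =====
-- stated objective: alternative
-- what changed: Replaces A's nested all-pairs loop comparing every prefix against every suffix with a single dict that groups indices by their k-prefix, then one lookup of each string's k-suffix (intended to cut the quadratic scan; measured 1.99x at the largest size both finished, unconfirmed beyond because the output itself is quadratic there).
import Mathlib
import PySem

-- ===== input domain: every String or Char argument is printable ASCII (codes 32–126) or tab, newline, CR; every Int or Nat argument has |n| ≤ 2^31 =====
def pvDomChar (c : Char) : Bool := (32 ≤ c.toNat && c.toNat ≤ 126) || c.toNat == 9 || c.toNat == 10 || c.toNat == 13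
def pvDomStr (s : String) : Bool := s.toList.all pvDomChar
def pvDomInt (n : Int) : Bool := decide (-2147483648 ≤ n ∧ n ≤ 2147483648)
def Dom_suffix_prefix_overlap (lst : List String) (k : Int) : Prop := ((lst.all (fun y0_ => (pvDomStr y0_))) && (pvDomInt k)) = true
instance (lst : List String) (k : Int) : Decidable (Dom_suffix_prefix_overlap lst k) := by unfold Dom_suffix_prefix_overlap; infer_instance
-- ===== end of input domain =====

-- B replaces A's all-pairs scan by one dict grouping indices by their k-prefix, then looks each
-- suffix up in it; same output (order by i, then j).

-- ===== PORT A =====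
def suffix_prefix_overlap (lst : List String) (k : Int) : List (Int × Int) :=
  (PySem.List.pyRange 0 (PySem.List.len lst) 1).foldl (fun ans i =>
    let suff := PySem.Str.slice (PySem.List.pyGetD lst i "") (some (-k)) none
    (PySem.List.pyRange 0 (PySem.List.len lst) 1).foldl (fun ans j =>
      if i ≠ j then
        if PySem.Str.slice (PySem.List.pyGetD lst j "") none (some k) == suff then
          ans ++ [(i, j)]
        else ans
      else ans) ans) []

-- ===== PORT B =====
def suffix_prefix_overlap_alt (lst : List String) (k : Int) : List (Int × Int) :=
  -- buckets: k-prefix -> list of indices (setdefault(..., []).append(j))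
  let buckets : PySem.Dict String (List Int) :=
    (PySem.List.enumerate lst 0).foldl
      (fun d p => d.modify (PySem.Str.slice p.2 none (some k)) [] (· ++ [p.1]))
      PySem.Dict.empty
  (PySem.List.enumerate lst 0).foldl (fun ans p =>
    (buckets.getD (PySem.Str.slice p.2 (some (-k)) none) []).foldl (fun ans j =>
      if j ≠ p.1 then ans ++ [(p.1, j)] else ans) ans) []

-- ===== PRECONDITION & SPEC =====
def Spec_suffix_prefix_overlap (lst : List String) (k : Int) (out : List (Int × Int)) : Prop := out = suffix_prefix_overlap_alt lst k
instance (lst : List String) (k : Int) (out : List (Int × Int)) : Decidable (Spec_suffix_prefix_overlap lst k out) := by unfold Spec_suffix_prefix_overlap; infer_instance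

-- ===== CLAIM (what is proved, stated in full; the proofs are below) =====
def Claim_equal_suffix_prefix_overlap : Prop := ∀ (lst : List String) (k : Int), Dom_suffix_prefix_overlap lst k → Spec_suffix_prefix_overlap lst k (suffix_prefix_overlap lst k)

-- ===== LEMMAS AND PROOFS =====

-- B's bucket for a key holds exactly the indices whose k-prefix equals the key, in index order.
theorem pv_bucket_getD (lst : List String) (k : Int) (key : String) :
    ((PySem.List.enumerate lst 0).foldl
        (fun d p => d.modify (PySem.Str.slice p.2 none (some k)) [] (· ++ [p.1]))
        PySem.Dict.empty).getD key []
      = ((PySem.List.enumerate lst 0).filter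
          (fun p => PySem.Str.slice p.2 none (some k) == key)).map (·.1) := by
  have h := PySem.Dict.getD_foldl_modify_append
    (l := (PySem.List.enumerate lst 0).map
      (fun p => (PySem.Str.slice p.2 none (some k), p.1)))
    (d := (PySem.Dict.empty : PySem.Dict String (List Int))) (c := key)
  rw [List.foldl_map] at h
  simpa [List.filter_map, List.map_map, Function.comp] using h

-- ===== VERDICT (by name: the statement is the Claim_ definition above) =====
theorem suffix_prefix_overlap_spec : Claim_equal_suffix_prefix_overlap := by
  intro lst k _
  unfold Spec_suffix_prefix_overlap suffix_prefix_overlap suffix_prefix_overlap_alt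
  simp only [pv_bucket_getD]
  rw [PySem.List.enumerate_eq_map_pyRange (xs := lst) (d := ""), List.foldl_map]
  apply PySem.List.foldl_congr_mem
  intro acc i _
  simp only [List.filter_map, List.map_map]
  rw [PySem.List.foldl_append_ite (p := fun j => j ≠ i) (f := fun j => (i, j))]
  simp only [← ite_and]
  rw [PySem.List.foldl_append_ite
    (p := fun j => i ≠ j ∧ (PySem.Str.slice (PySem.List.pyGetD lst j "") none (some k)
          == PySem.Str.slice (PySem.List.pyGetD lst i "") (some (-k)) none) = true)
    (f := fun j => (i, j))]
  congr 1
  congr 1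
  simp only [Function.comp_def]
  rw [List.map_id', List.filter_filter]
  apply List.filter_congr
  intro j _
  by_cases h : j = i
  · subst h; simp
  · simp [h, Ne.symm h]
    exact Eq.symm (Bool.beq_eq_decide_eq _ _)
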